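-- pv_equiv track=rewrite | github.com/great754/PushProgress | tracker/views.py | pair_days
-- ===== SOURCE A (Python) =====
-- def pair_days(days, workout):
--     result = []
--     days = set(days)
--     added = {}
--     all_days = ["Monday", "Tuesday", "Wednesday", "Thursday", "Friday", "Saturday", "Sunday"]
--
--     for day in all_days:
--         indices = list(workout)
--         if day not in days:
--             result.append({day: {"Rest": "Rest Today"}})
--         else:
--             if len(indices) == 0:
--                 result.append({day: {"Rest": "Rest Today"}})
--             else:
--                 result.append({day: {indices[0]: workout[indices[0]]}})
--                 del workout[indices[0]]
--
--     return result
-- ===== SOURCE B (Python) =====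
-- # B: index-first decomposition — precompute which weekday gets which workout key
-- # via dict(zip(active_days, keys)), then one pass over the week; same in-place
-- # mutation of `workout` (the consumed prefix of keys is deleted at the end).
-- ALL_DAYS = ["Monday", "Tuesday", "Wednesday", "Thursday", "Friday", "Saturday", "Sunday"]
--
-- def pair_days(days, workout):
--     dset = set(days)
--     active = [d for d in ALL_DAYS if d in dset]
--     keys = list(workout)
--     assignment = dict(zip(active, keys))
--     result = []
--     for day in ALL_DAYS:
--         k = assignment.get(day)
--         if k is None:
--             result.append({day: {"Rest": "Rest Today"}})
--         else:
--             result.append({day: {k: workout[k]}})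
--     for k in keys[:len(assignment)]:
--         del workout[k]
--     return result
-- ===== Notes on version B (the rewrite author's own statement) =====
-- stated objective: alternative
-- what changed: A interleaves scanning and popping the workout dict inside the weekday loop; B first computes the day-to-key assignment as dict(zip(active_days, keys)) and then builds the week in one uniform pass (deleting the consumed key prefix afterwards to preserve the in-place mutation).
import Mathlib
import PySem

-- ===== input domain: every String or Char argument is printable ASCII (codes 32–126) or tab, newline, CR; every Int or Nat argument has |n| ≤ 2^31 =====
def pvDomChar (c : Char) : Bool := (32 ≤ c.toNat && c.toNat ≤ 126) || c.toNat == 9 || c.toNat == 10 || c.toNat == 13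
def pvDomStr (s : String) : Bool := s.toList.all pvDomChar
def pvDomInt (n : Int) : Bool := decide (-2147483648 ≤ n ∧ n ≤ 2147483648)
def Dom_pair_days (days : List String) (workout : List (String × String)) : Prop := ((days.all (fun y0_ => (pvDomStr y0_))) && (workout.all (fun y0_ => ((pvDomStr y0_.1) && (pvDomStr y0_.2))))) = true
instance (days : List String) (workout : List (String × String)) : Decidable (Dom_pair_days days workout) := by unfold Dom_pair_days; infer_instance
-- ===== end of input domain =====

-- B replaces A's interleaved scan-and-pop over the week by an index-first decomposition
-- (precomputed day→key assignment via zip, then one uniform pass); equivalence proved for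
-- the RETURN value — both Pythons also mutate `workout` identically (the same key prefix is deleted).

-- the module-level list of weekdays (a literal in A, module constant in B)
def pvAllDays : List String :=
  ["Monday", "Tuesday", "Wednesday", "Thursday", "Friday", "Saturday", "Sunday"]

-- ===== PORT A =====
-- the for-loop of A, threading (result, workout); `workout` is the Python dict
def pairGoA (daysSet : PySem.Set String) (ds : List String)
    (result : List (List (String × List (String × String))))
    (w : PySem.Dict String String) : List (List (String × List (String × String))) :=
  match ds with
  | [] => result
  | day :: rest =>
    let indices := w.keys                          -- indices = list(workout)
    if ¬ (PySem.Set.contains daysSet day) then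
      pairGoA daysSet rest (result ++ [[(day, [("Rest", "Rest Today")])]]) w
    else if indices.length = 0 then
      pairGoA daysSet rest (result ++ [[(day, [("Rest", "Rest Today")])]]) w
    else
      -- indices[0]: in range (length ≠ 0 by the guard), so the default is never read
      let k := PySem.List.pyGetD indices 0 ""
      -- workout[indices[0]]: the key is present, so the default is never read
      let v := (w.get? k).getD ""
      pairGoA daysSet rest (result ++ [[(day, [(k, v)])]]) (w.erase k)

def pair_days (days : List String) (workout : List (String × String)) : List (List (String × List (String × String))) :=
  pairGoA (PySem.Set.ofList days) pvAllDays [] (PySem.Dict.mk workout)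

-- ===== PORT B =====
def pair_days_alt (days : List String) (workout : List (String × String)) : List (List (String × List (String × String))) :=
  let dset := PySem.Set.ofList days
  let active := pvAllDays.filter (fun d => PySem.Set.contains dset d)
  let w := PySem.Dict.mk workout
  let keys := w.keys
  let assignment := PySem.Dict.ofList (List.zip active keys)   -- dict(zip(active, keys))
  pvAllDays.map (fun day =>
    match assignment.get? day with
    | none => [(day, [("Rest", "Rest Today")])]
    | some k => [(day, [(k, (w.get? k).getD "")])])   -- workout[k]: k is a key of workout

-- ===== PRECONDITION & SPEC =====
-- `workout` is a Python dict, so its keys are pairwise distinct; Pre_ states exactly that shape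
-- (every dict the Python function can receive satisfies it).
def Pre_pair_days (days : List String) (workout : List (String × String)) : Prop :=
  (workout.map Prod.fst).Nodup
instance (days : List String) (workout : List (String × String)) : Decidable (Pre_pair_days days workout) := by unfold Pre_pair_days; infer_instance

def pvWitness_pair_days : List String × (List (String × String)) :=
  (["Monday", "Friday"], [("Push", "Bench"), ("Pull", "Row")])

def Spec_pair_days (days : List String) (workout : List (String × String)) (out : List (List (String × List (String × String)))) : Prop := out = pair_days_alt days workout
instance (days : List String) (workout : List (String × String)) (out : List (List (String × List (String × String)))) : Decidable (Spec_pair_days days workout out) := by unfold Spec_pair_days; infer_instance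

-- ===== CLAIM (what is proved, stated in full; the proofs are below) =====
def Claim_equal_pair_days : Prop := ∀ (days : List String) (workout : List (String × String)), Dom_pair_days days workout → Pre_pair_days days workout → Spec_pair_days days workout (pair_days days workout)

-- ===== LEMMAS AND PROOFS =====

-- the entry B builds for `day` under assignment `a`, reading values from `w`
def pvEntry (a w : PySem.Dict String String) (day : String) :
    List (String × List (String × String)) :=
  match a.get? day with
  | none => [(day, [("Rest", "Rest Today")])]
  | some k => [(day, [(k, (w.get? k).getD "")])]

lemma nodup_map_fst_zip {α β : Type} (xs : List α) (ys : List β) (h : xs.Nodup) :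
    ((List.zip xs ys).map Prod.fst).Nodup := by
  induction xs generalizing ys with
  | nil => simp
  | cons x xs ih =>
    cases ys with
    | nil => simp
    | cons y ys =>
      simp only [List.zip_cons_cons, List.map_cons, List.nodup_cons] at *
      refine ⟨fun hx => h.1 ?_, ih ys h.2⟩
      rcases List.mem_map.mp hx with ⟨p, hp, hpe⟩
      exact hpe ▸ (List.of_mem_zip hp).1

lemma ofList_eq_mk_of_nodup {ν : Type} (ps : List (String × ν))
    (h : (ps.map Prod.fst).Nodup) : PySem.Dict.ofList ps = PySem.Dict.mk ps := by
  apply PySem.Dict.ext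
  have := PySem.Dict.items_foldl_insert_fresh (d := (PySem.Dict.empty : PySem.Dict String ν))
    (l := ps) (k := Prod.fst) (v := Prod.snd)
    (by intro a _; exact PySem.Dict.contains_empty _) h
  simpa [PySem.Dict.ofList, PySem.Dict.update, PySem.Dict.empty] using this

lemma pairGoA_spec (S : PySem.Set String) :
    ∀ (ds : List String) (w : List (String × String))
      (acc : List (List (String × List (String × String)))),
      ds.Nodup → (w.map Prod.fst).Nodup →
      pairGoA S ds acc (PySem.Dict.mk w) =
        acc ++ ds.map (pvEntry
          (PySem.Dict.mk (List.zip (ds.filter (fun d => PySem.Set.contains S d)) (w.map Prod.fst)))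
          (PySem.Dict.mk w)) := by
  intro ds
  induction ds with
  | nil => intro w acc _ _; simp [pairGoA]
  | cons d ds ih =>
    intro w acc hnd hw
    rw [List.nodup_cons] at hnd
    by_cases hact : PySem.Set.contains S d
    · -- d is an active day
      cases w with
      | nil =>
        -- empty workout: rest entry, workout unchanged
        rw [pairGoA]
        rw [if_neg (not_not_intro hact)]
        rw [if_pos (by simp [PySem.Dict.keys])]
        rw [ih [] _ hnd.2 (by simp)]
        simp [pvEntry, PySem.Dict.get?]
      | cons p rest =>
        obtain ⟨k, v⟩ := p
        simp only [List.map_cons, List.nodup_cons] at hw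
        rw [pairGoA]
        rw [if_neg (not_not_intro hact)]
        have hkeys : (PySem.Dict.mk ((k, v) :: rest)).keys = k :: rest.map Prod.fst := by
          simp [PySem.Dict.keys]
        rw [if_neg (by rw [hkeys]; simp)]
        have hk0 : PySem.List.pyGetD ((PySem.Dict.mk ((k, v) :: rest)).keys) (0 : Int) "" = k := by
          rw [hkeys]; simp [PySem.List.pyGetD_zero_cons]
        have hv0 : ((PySem.Dict.mk ((k, v) :: rest)).get? k).getD "" = v := by
          simp [PySem.Dict.get?]
        have herase : (PySem.Dict.mk ((k, v) :: rest)).erase k = PySem.Dict.mk rest := by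
          simp only [PySem.Dict.erase]
          congr 1
          simp only [List.filter_cons, beq_self_eq_true, Bool.not_true]
          rw [if_neg (by simp)]
          refine List.filter_eq_self.mpr ?_
          intro p hp
          simp only [Bool.not_eq_eq_eq_not, Bool.not_true, beq_eq_false_iff_ne, ne_eq]
          intro hpk
          exact hw.1 (List.mem_map.mpr ⟨p, hp, hpk⟩)
        rw [hk0]
        dsimp only
        rw [hv0, herase, ih rest _ hnd.2 hw.2]
        -- now identify entry by entry
        simp only [List.filter_cons_of_pos hact, List.map_cons, List.zip_cons_cons,
          List.append_assoc, List.singleton_append]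
        congr 1
        congr 1
        · -- head entry: assignment maps d to k, value is v
          simp [pvEntry, PySem.Dict.get?_mk_cons]
        · -- tail: drop the (d, k) assignment entry and read values from rest instead of w
          apply List.map_congr_left
          intro day hday
          have hne : d ≠ day := fun he => hnd.1 (he ▸ hday)
          unfold pvEntry
          rw [PySem.Dict.get?_mk_cons]
          rw [if_neg (by simp [hne])]
          cases hget : (PySem.Dict.mk (List.zip (List.filter (fun d => PySem.Set.contains S d) ds) (List.map Prod.fst rest))).get? day with
          | none => rfl
          | some k' =>
            have hk' : k' ∈ rest.map Prod.fst := by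
              have hmem := PySem.Dict.mem_items_of_get?_eq_some _ hget
              
              exact (List.of_mem_zip hmem).2
            have hkne : k ≠ k' := fun he => hw.1 (he ▸ hk')
            simp [PySem.Dict.get?_mk_cons, hkne]
    · -- d is a rest day: nothing consumed, assignment unchanged
      rw [pairGoA]
      rw [if_pos hact]
      rw [ih w _ hnd.2 hw]
      simp only [List.filter_cons_of_neg hact, List.map_cons, List.append_assoc,
        List.singleton_append]
      congr 1
      congr 1
      unfold pvEntry
      have hnone : (PySem.Dict.mk (List.zip (List.filter (fun d => PySem.Set.contains S d) ds) (w.map Prod.fst))).get? d = none := by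
        rw [PySem.Dict.get?_eq_none_iff_not_mem_keys]
        simp only [PySem.Dict.keys]
        intro hmem
        rcases List.mem_map.mp hmem with ⟨p, hp, hpe⟩
        have hfst := (List.of_mem_zip hp).1
        rw [hpe] at hfst
        exact hact (List.of_mem_filter hfst)
      rw [hnone]

-- ===== VERDICT (by name: the statement is the Claim_ definition above) =====
theorem pair_days_spec : Claim_equal_pair_days := by
  intro days workout _ hpre
  unfold Spec_pair_days
  simp only [pair_days, pair_days_alt]
  have hnodup : pvAllDays.Nodup := by decide
  rw [pairGoA_spec (PySem.Set.ofList days) pvAllDays workout [] hnodup hpre]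
  rw [show (PySem.Dict.mk workout).keys = workout.map Prod.fst from rfl]
  rw [ofList_eq_mk_of_nodup _ (nodup_map_fst_zip _ _ (List.Nodup.filter _ hnodup))]
  simp only [List.nil_append]
  apply List.map_congr_left
  intro day _
  unfold pvEntry
  cases (PySem.Dict.mk (List.zip (List.filter (fun d => PySem.Set.contains (PySem.Set.ofList days) d) pvAllDays) (workout.map Prod.fst))).get? day <;> rfl
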